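-- pv_equiv track=rewrite | github.com/SKYtp/Signature_design_back-end | src/get_contour.py | biggest_two_num
-- ===== SOURCE A (Python) =====
-- def biggest_two_num(points):
--     number_group = []
--     group_dict = {}
--     for i in range(len(points)):
--         number_group.append(len(points[i]))
--         group_dict[len(points[i])] = i
--     number_group = sorted(number_group, reverse=True)
--     return [group_dict[number_group[0]], group_dict[number_group[1]]]
-- ===== SOURCE B (Python) =====
-- def biggest_two_num(points):
--     last = {}
--     l1 = l2 = None
--     for i, p in enumerate(points):
--         n = len(p)
--         last[n] = i
--         if l1 is None or n > l1:
--             l1, l2 = n, l1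
--         elif l2 is None or n > l2:
--             l2 = n
--     return [last[l1], last[l2]]
-- ===== Notes on version B (the rewrite author's own statement) =====
-- stated objective: alternative
-- what changed: Replaces building a lengths list and sorting it descending with a single enumerate pass that tracks the two largest length values (with multiplicity) and the last index seen for each length.
import Mathlib
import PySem

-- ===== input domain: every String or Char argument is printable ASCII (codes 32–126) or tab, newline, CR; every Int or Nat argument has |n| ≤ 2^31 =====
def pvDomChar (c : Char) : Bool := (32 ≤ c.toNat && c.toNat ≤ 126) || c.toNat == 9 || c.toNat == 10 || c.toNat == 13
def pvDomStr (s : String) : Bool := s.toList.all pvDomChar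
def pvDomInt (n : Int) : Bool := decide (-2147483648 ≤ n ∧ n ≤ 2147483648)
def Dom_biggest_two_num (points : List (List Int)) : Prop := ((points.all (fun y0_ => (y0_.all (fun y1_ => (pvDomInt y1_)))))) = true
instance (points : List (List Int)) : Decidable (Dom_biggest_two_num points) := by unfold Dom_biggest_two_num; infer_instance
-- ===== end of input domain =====

-- B replaces A's build-lengths-list-then-sort-descending by a single pass tracking the two
-- largest length values and the last index per length (objective: alternative algorithm).


-- ===== PORT A =====
-- for i in range(len(points)): number_group.append(len(points[i])); group_dict[len(points[i])] = i
-- points[i] is ported as pyGetD (i is always in range here, so Python never raises on it);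
-- number_group[0]/[1] as pyGetD: in range exactly when 2 ≤ len(points) (Pre_), defaults never used there.
def biggest_two_num (points : List (List Int)) : List Int :=
  let st := (PySem.List.pyRange 0 (points.length : Int) 1).foldl
    (fun (st : List Int × PySem.Dict Int Int) i =>
      (st.1 ++ [((PySem.List.pyGetD points i []).length : Int)],
       st.2.insert ((PySem.List.pyGetD points i []).length : Int) i))
    ([], PySem.Dict.empty)
  let number_group := PySem.List.sorted st.1 (fun x => x) true
  [st.2.getD (PySem.List.pyGetD number_group 0 0) 0,
   st.2.getD (PySem.List.pyGetD number_group 1 0) 0]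

-- ===== PORT B =====
-- one enumerate pass: last[n] = i, and (l1, l2) = two largest length values seen (None = Option.none);
-- the final last[l1]/last[l2] raise in Python when len(points) < 2 (l1 or l2 is None) — outside Pre_,
-- the port returns [] there.
def biggest_two_num_alt (points : List (List Int)) : List Int :=
  let st := (PySem.List.enumerate points).foldl
    (fun (st : PySem.Dict Int Int × Option Int × Option Int) ip =>
      (st.1.insert ((ip.2.length : Int)) ip.1,
       match st.2.1, st.2.2 with
       | none, _ => (some ((ip.2.length : Int)), none)
       | some a, l2 =>
         if a < (ip.2.length : Int) then (some ((ip.2.length : Int)), some a)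
         else
           match l2 with
           | none => (some a, some ((ip.2.length : Int)))
           | some b => if b < (ip.2.length : Int) then (some a, some ((ip.2.length : Int)))
                       else (some a, some b)))
    (PySem.Dict.empty, none, none)
  match st.2.1, st.2.2 with
  | some a, some b => [st.1.getD a 0, st.1.getD b 0]
  | _, _ => []

-- ===== PRECONDITION & SPEC =====
-- Pre_ excludes exactly the inputs where Python A raises: fewer than two point groups (IndexError on number_group[1]).
def Pre_biggest_two_num (points : List (List Int)) : Prop := 2 ≤ points.length
instance (points : List (List Int)) : Decidable (Pre_biggest_two_num points) := by unfold Pre_biggest_two_num; infer_instance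
def pvWitness_biggest_two_num : List (List Int) := [[], [5]]

def Spec_biggest_two_num (points : List (List Int)) (out : List Int) : Prop := out = biggest_two_num_alt points
instance (points : List (List Int)) (out : List Int) : Decidable (Spec_biggest_two_num points out) := by unfold Spec_biggest_two_num; infer_instance

-- ===== CLAIM (what is proved, stated in full; the proofs are below) =====
def Claim_equal_biggest_two_num : Prop := ∀ (points : List (List Int)), Dom_biggest_two_num points → Pre_biggest_two_num points → Spec_biggest_two_num points (biggest_two_num points)

-- ===== LEMMAS AND PROOFS =====

-- proof-side names for the two folds' components
def pvDictStep (d : PySem.Dict Int Int) (ip : Int × List Int) : PySem.Dict Int Int :=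
  d.insert ((ip.2.length : Int)) ip.1

def pvTop2Step (p : Option Int × Option Int) (n : Int) : Option Int × Option Int :=
  match p.1, p.2 with
  | none, _ => (some n, none)
  | some a, l2 =>
    if a < n then (some n, some a)
    else
      match l2 with
      | none => (some a, some n)
      | some b => if b < n then (some a, some n) else (some a, some b)

def pvDictOf (points : List (List Int)) : PySem.Dict Int Int :=
  (PySem.List.enumerate points).foldl pvDictStep PySem.Dict.empty

def pvTop2 (ls : List Int) : Option Int × Option Int :=
  ls.foldl pvTop2Step (none, none)

-- characterisation of pvTop2: first = max value, second = max value after erasing one max occurrence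
lemma pvTop2_eq (ls : List Int) :
    pvTop2 ls = (ls.max?, ls.max?.elim none (fun m => (ls.erase m).max?)) := by
  induction ls using List.reverseRecOn with
  | nil => rfl
  | append_singleton t x ih =>
    unfold pvTop2 at *
    rw [List.foldl_append, ih]
    cases ht : t.max? with
    | none =>
      have : t = [] := List.max?_eq_none_iff.mp ht
      subst this
      simp [pvTop2Step]
    | some M =>
      obtain ⟨hMmem, hMle⟩ := List.max?_eq_some_iff.mp ht
      by_cases hx : M < x
      · have hxt : x ∉ t := fun hmem => absurd (hMle x hmem) (by omega)
        have h1 : (t ++ [x]).max? = some x := by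
          rw [List.max?_eq_some_iff]
          constructor
          · simp
          · intro b hb
            rcases List.mem_append.mp hb with hb | hb
            · exact le_of_lt (lt_of_le_of_lt (hMle b hb) hx)
            · simp at hb; omega
        have h2 : (t ++ [x]).erase x = t := by
          rw [List.erase_append_right _ hxt]; simp
        simp [pvTop2Step, hx, h1, h2, ht]
      · have h1 : (t ++ [x]).max? = some M := by
          rw [List.max?_eq_some_iff]
          constructor
          · exact List.mem_append.mpr (Or.inl hMmem)
          · intro b hb
            rcases List.mem_append.mp hb with hb | hb
            · exact hMle b hb
            · simp at hb; omega
        have h2 : (t ++ [x]).erase M = t.erase M ++ [x] := List.erase_append_left _ hMmem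
        cases he : (t.erase M).max? with
        | none =>
          have : t.erase M = [] := List.max?_eq_none_iff.mp he
          simp [pvTop2Step, hx, h1, h2, this]
        | some N =>
          obtain ⟨hNmem, hNle⟩ := List.max?_eq_some_iff.mp he
          have h3 : (t.erase M ++ [x]).max? = some (if N < x then x else N) := by
            rw [List.max?_eq_some_iff]
            constructor
            · by_cases hNx : N < x <;> simp [hNx, hNmem]
            · intro b hb
              rcases List.mem_append.mp hb with hb | hb
              · have := hNle b hb
                by_cases hNx : N < x <;> simp [hNx] <;> omega
              · simp at hb
                by_cases hNx : N < x <;> simp [hNx] <;> omega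
          by_cases hNx : N < x <;> simp [pvTop2Step, hx, h1, h2, h3, he, hNx]

lemma pvEnumFold (pts : List (List Int)) (s : Int) (p : Option Int × Option Int) :
    (PySem.List.enumerate pts s).foldl (fun p ip => pvTop2Step p ((ip.2.length : Int))) p
      = pts.foldl (fun acc q => pvTop2Step acc ((q.length : Int))) p := by
  induction pts generalizing s p with
  | nil => rfl
  | cons q rest ih =>
    rw [PySem.List.enumerate_cons, List.foldl_cons, List.foldl_cons, ih]

-- splitting a fold over a pair of independent accumulators (cited): PySem.List.foldl_prod_mk

lemma pvAltFold (points : List (List Int)) :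
    (PySem.List.enumerate points).foldl
      (fun (st : PySem.Dict Int Int × Option Int × Option Int) ip =>
        (st.1.insert ((ip.2.length : Int)) ip.1,
         match st.2.1, st.2.2 with
         | none, _ => (some ((ip.2.length : Int)), none)
         | some a, l2 =>
           if a < (ip.2.length : Int) then (some ((ip.2.length : Int)), some a)
           else
             match l2 with
             | none => (some a, some ((ip.2.length : Int)))
             | some b => if b < (ip.2.length : Int) then (some a, some ((ip.2.length : Int)))
                         else (some a, some b)))
      (PySem.Dict.empty, none, none)
    = (pvDictOf points, pvTop2 (points.map (fun p => (p.length : Int)))) := by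
  have h := PySem.List.foldl_prod_mk (f := pvDictStep)
      (g := fun p (ip : Int × List Int) => pvTop2Step p ((ip.2.length : Int)))
      (l := PySem.List.enumerate points) (a := PySem.Dict.empty) (b := ((none, none) : Option Int × Option Int))
  have hb : (fun (st : PySem.Dict Int Int × Option Int × Option Int) (ip : Int × List Int) =>
        (st.1.insert ((ip.2.length : Int)) ip.1,
         match st.2.1, st.2.2 with
         | none, _ => (some ((ip.2.length : Int)), none)
         | some a, l2 =>
           if a < (ip.2.length : Int) then (some ((ip.2.length : Int)), some a)
           else
             match l2 with
             | none => (some a, some ((ip.2.length : Int)))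
             | some b => if b < (ip.2.length : Int) then (some a, some ((ip.2.length : Int)))
                         else (some a, some b)))
      = (fun st ip => (pvDictStep st.1 ip,
          (fun p (ip : Int × List Int) => pvTop2Step p ((ip.2.length : Int))) st.2 ip)) := rfl
  rw [hb, h]
  simp only [Prod.mk.injEq]
  refine ⟨rfl, ?_⟩
  show (PySem.List.enumerate points).foldl (fun p ip => pvTop2Step p ((ip.2.length : Int))) (none, none) = _
  rw [pvTop2, List.foldl_map, pvEnumFold]

lemma pvAFold (points : List (List Int)) :
    (PySem.List.pyRange 0 (points.length : Int) 1).foldl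
      (fun (st : List Int × PySem.Dict Int Int) i =>
        (st.1 ++ [((PySem.List.pyGetD points i []).length : Int)],
         st.2.insert ((PySem.List.pyGetD points i []).length : Int) i))
      ([], PySem.Dict.empty)
    = (points.map (fun p => (p.length : Int)), pvDictOf points) := by
  have h := PySem.List.foldl_prod_mk
      (f := fun (l : List Int) (i : Int) => l ++ [((PySem.List.pyGetD points i []).length : Int)])
      (g := fun (d : PySem.Dict Int Int) (i : Int) => d.insert ((PySem.List.pyGetD points i []).length : Int) i)
      (l := PySem.List.pyRange 0 (points.length : Int) 1) (a := ([] : List Int)) (b := PySem.Dict.empty)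
  rw [h]
  simp only [Prod.mk.injEq]
  constructor
  · rw [PySem.List.foldl_append_singleton_eq_map]
    show List.map ((fun (p : List Int) => (p.length : Int)) ∘ (fun i => PySem.List.pyGetD points i [])) _ = _
    rw [← List.map_map]
    rw [PySem.List.map_pyGetD_pyRange_zero']
  · rw [pvDictOf, PySem.List.enumerate_eq_map_pyRange points ([] : List Int), List.foldl_map]
    rfl

-- max value and second max value read off a reverse-sorted list
lemma pvSorted_max (ls : List Int) (m n : Int) (t : List Int)
    (hs : PySem.List.sorted ls (fun x => x) true = m :: n :: t) :
    ls.max? = some m ∧ (ls.erase m).max? = some n := by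
  have hperm : (m :: n :: t).Perm ls := hs ▸ PySem.List.sorted_perm ls (fun x => x) true
  have hle : ∀ y ∈ ls, y ≤ m := by
    intro y hy
    exact PySem.List.key_head_sorted_rev_ge _ _ hs y hy
  have hm : m ∈ ls := hperm.mem_iff.mp (by simp)
  have hpw : (m :: n :: t).Pairwise (fun a b => b ≤ a) :=
    hs ▸ PySem.List.sorted_pairwise_rev ls (fun x => x)
  have hpw' : (n :: t).Pairwise (fun a b => b ≤ a) := hpw.of_cons
  have hperm' : (n :: t).Perm (ls.erase m) :=
    ((hperm.trans (List.perm_cons_erase hm))).cons_inv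
  constructor
  · exact List.max?_eq_some_iff.mpr ⟨hm, hle⟩
  · rw [List.max?_eq_some_iff]
    constructor
    · exact hperm'.mem_iff.mp (by simp)
    · intro b hb
      have hb' : b ∈ n :: t := hperm'.mem_iff.mpr hb
      rcases List.mem_cons.mp hb' with h | h
      · omega
      · exact List.rel_of_pairwise_cons hpw' h

-- ===== VERDICT (by name: the statement is the Claim_ definition above) =====
theorem biggest_two_num_spec : Claim_equal_biggest_two_num := by
  intro points _ hpre
  unfold Pre_biggest_two_num at hpre
  have hlen : 2 ≤ (points.map (fun p => (p.length : Int))).length := by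
    simpa using hpre
  have hslen : (PySem.List.sorted (points.map (fun p => (p.length : Int))) (fun x => x) true).length
      = (points.map (fun p => (p.length : Int))).length :=
    PySem.List.length_sorted _ (fun x => x) true
  obtain ⟨m, n, t, hs⟩ : ∃ m n t,
      PySem.List.sorted (points.map (fun p => (p.length : Int))) (fun x => x) true = m :: n :: t := by
    cases h : PySem.List.sorted (points.map (fun p => (p.length : Int))) (fun x => x) true with
    | nil => rw [h] at hslen; simp at hslen; omega
    | cons a u =>
      cases hu : u with
      | nil => rw [h, hu] at hslen; simp at hslen; omega
      | cons b v => exact ⟨a, b, v, rfl⟩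
  obtain ⟨hm, hn⟩ := pvSorted_max _ m n t hs
  unfold Spec_biggest_two_num biggest_two_num biggest_two_num_alt
  simp only [pvAltFold, pvAFold, pvTop2_eq, hs, hm, hn, Option.elim]
  simp [PySem.List.pyGetD]
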